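-- pv_equiv track=rewrite | github.com/alexjabka/spiderwick-chronicles-re | tools/legacy/spiderwick_world_obj.py | cluster_chunks
-- ===== SOURCE A (Python) =====
-- from collections import defaultdict
--
-- CLUSTER_DIST = 25.0  # merge chunks within this distance
--
-- def cluster_chunks(chunks_with_centers):
--     """Group chunks by spatial proximity. Returns list of lists."""
--     n = len(chunks_with_centers)
--     if n <= 1:
--         return [list(range(n))]
--
--     parent = list(range(n))
--
--     def find(x):
--         while parent[x] != x:
--             parent[x] = parent[parent[x]]
--             x = parent[x]
--         return x
--
--     def union(a, b):
--         parent[find(a)] = find(b)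
--
--     for i in range(n):
--         ci = chunks_with_centers[i]
--         for j in range(i + 1, n):
--             cj = chunks_with_centers[j]
--             dx = ci[0] - cj[0]
--             dy = ci[1] - cj[1]
--             dz = ci[2] - cj[2]
--             if dx*dx + dy*dy + dz*dz < CLUSTER_DIST * CLUSTER_DIST:
--                 union(i, j)
--
--     groups = defaultdict(list)
--     for i in range(n):
--         groups[find(i)].append(i)
--     return list(groups.values())
-- ===== SOURCE B (Python) =====
-- CLUSTER_DIST = 25.0  # merge chunks within this distance
--
-- def cluster_chunks(chunks_with_centers):
--     """Group chunks by spatial proximity. Returns list of lists."""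
--     n = len(chunks_with_centers)
--     cid = list(range(n))  # flat component label per chunk
--     for i in range(n):
--         ci = chunks_with_centers[i]
--         for j in range(i + 1, n):
--             cj = chunks_with_centers[j]
--             dx = ci[0] - cj[0]
--             dy = ci[1] - cj[1]
--             dz = ci[2] - cj[2]
--             if dx*dx + dy*dy + dz*dz < CLUSTER_DIST * CLUSTER_DIST:
--                 a, b = cid[i], cid[j]
--                 if a != b:
--                     cid = [b if v == a else v for v in cid]
--     reps = []
--     for r in cid:
--         if r not in reps:
--             reps.append(r)
--     return [[i for i in range(n) if cid[i] == r] for r in reps]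
-- ===== Notes on version B (the rewrite author's own statement) =====
-- stated objective: alternative
-- what changed: Union-find with path halving is replaced by a flat label array: each merge rewrites one label into the other by a comprehension, and the groups are read off the labels by first-occurrence dedup plus filtering, with no parent forest, find or union.
-- intended difference: On the empty input A returns [[]] (a list containing one empty group); B returns [] (no groups), the intended value since there are no chunks to group. — e.g. on cluster_chunks([]): A returns [[]], B returns []
import Mathlib
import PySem

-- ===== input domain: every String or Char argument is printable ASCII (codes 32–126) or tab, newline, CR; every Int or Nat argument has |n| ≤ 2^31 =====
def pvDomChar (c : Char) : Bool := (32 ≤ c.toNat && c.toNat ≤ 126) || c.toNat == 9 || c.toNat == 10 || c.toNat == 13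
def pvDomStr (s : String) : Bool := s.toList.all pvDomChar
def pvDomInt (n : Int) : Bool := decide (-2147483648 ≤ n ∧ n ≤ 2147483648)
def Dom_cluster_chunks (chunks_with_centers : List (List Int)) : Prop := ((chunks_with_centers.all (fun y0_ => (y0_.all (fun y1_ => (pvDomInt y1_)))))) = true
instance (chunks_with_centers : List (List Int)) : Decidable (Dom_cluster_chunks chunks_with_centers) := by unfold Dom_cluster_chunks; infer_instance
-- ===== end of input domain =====

-- B replaces A's union-find (parent forest, find with path halving) by a flat label array that is
-- rewritten wholesale on each merge; groups are read off the labels by first-occurrence dedup and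
-- filtering.  Objective: alternative (no speed claim).  Equivalence is about the return value only.

-- ===== PORT A =====
-- `find` with path halving: `while parent[x] != x: parent[x] = parent[parent[x]]; x = parent[x]`.
-- Python's while loop is ported with fuel; callers pass fuel = len(parent), which is proved
-- sufficient (a find on an n-node parent forest takes < n iterations).
def pvFindA : Nat → List Nat → Nat → List Nat × Nat
  | 0, p, x => (p, x)
  | fuel + 1, p, x =>
    let px := p.getD x 0
    if px ≠ x then
      let g := p.getD px 0        -- parent[parent[x]]
      pvFindA fuel (p.set x g) g  -- parent[x] = g; x = parent[x] (now g)
    else (p, x)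

-- `union`: `parent[find(a)] = find(b)` — Python evaluates the right-hand side find(b) first.
def pvUnionA (p : List Nat) (a b : Nat) : List Nat :=
  let fb := pvFindA p.length p b
  let fa := pvFindA fb.1.length fb.1 a
  fa.1.set fa.2 fb.2

-- inner loop body over j (ci is re-read from chunks instead of being bound in the outer loop: same value)
def pvInnerA (chunks : List (List Int)) (i : Nat) (p : List Nat) (j : Nat) : List Nat :=
  let ci := chunks.getD i []
  let cj := chunks.getD j []
  let dx := PySem.List.pyGetD ci 0 0 - PySem.List.pyGetD cj 0 0
  let dy := PySem.List.pyGetD ci 1 0 - PySem.List.pyGetD cj 1 0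
  let dz := PySem.List.pyGetD ci 2 0 - PySem.List.pyGetD cj 2 0
  -- `dx*dx+dy*dy+dz*dz < 25.0*25.0` : exact integer comparison, the float 625.0 is exact
  if dx * dx + dy * dy + dz * dz < 625 then pvUnionA p i j else p

def pvOuterA (chunks : List (List Int)) (p : List Nat) (i : Nat) : List Nat :=
  ((List.range chunks.length).drop (i + 1)).foldl (pvInnerA chunks i) p   -- range(i+1, n)

-- `groups[find(i)].append(i)` on a defaultdict(list)
def pvGroupA (s : List Nat × PySem.Dict Nat (List Int)) (i : Nat) : List Nat × PySem.Dict Nat (List Int) :=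
  let fr := pvFindA s.1.length s.1 i
  (fr.1, s.2.modify fr.2 [] (fun g => g ++ [(i : Int)]))

def cluster_chunks (chunks_with_centers : List (List Int)) : List (List Int) :=
  let n := chunks_with_centers.length
  if n ≤ 1 then [(List.range n).map (fun i => (i : Int))]
  else
    let parent := (List.range n).foldl (pvOuterA chunks_with_centers) (List.range n)
    ((List.range n).foldl pvGroupA (parent, PySem.Dict.empty)).2.values

-- ===== PORT B =====
def pvInnerB (chunks : List (List Int)) (i : Nat) (c : List Nat) (j : Nat) : List Nat :=
  let ci := chunks.getD i []
  let cj := chunks.getD j []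
  let dx := PySem.List.pyGetD ci 0 0 - PySem.List.pyGetD cj 0 0
  let dy := PySem.List.pyGetD ci 1 0 - PySem.List.pyGetD cj 1 0
  let dz := PySem.List.pyGetD ci 2 0 - PySem.List.pyGetD cj 2 0
  if dx * dx + dy * dy + dz * dz < 625 then
    let a := c.getD i 0
    let b := c.getD j 0
    if a ≠ b then c.map (fun v => if v = a then b else v) else c  -- [b if v == a else v for v in cid]
  else c

def pvOuterB (chunks : List (List Int)) (c : List Nat) (i : Nat) : List Nat :=
  ((List.range chunks.length).drop (i + 1)).foldl (pvInnerB chunks i) c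

def cluster_chunks_alt (chunks_with_centers : List (List Int)) : List (List Int) :=
  let n := chunks_with_centers.length
  let cid := (List.range n).foldl (pvOuterB chunks_with_centers) (List.range n)
  let reps := cid.foldl (fun rs r => if rs.contains r then rs else rs ++ [r]) []
  reps.map (fun r => ((List.range n).filter (fun i => cid.getD i 0 == r)).map (fun i => (i : Int)))

-- ===== PRECONDITION & SPEC =====
-- Pre_ excludes exactly the inputs on which Python A raises IndexError: two or more chunks and
-- some chunk with fewer than 3 coordinates.
def Pre_cluster_chunks (chunks_with_centers : List (List Int)) : Prop :=
  chunks_with_centers.length ≤ 1 ∨ ∀ c ∈ chunks_with_centers, 3 ≤ c.length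
instance (chunks_with_centers : List (List Int)) : Decidable (Pre_cluster_chunks chunks_with_centers) := by
  unfold Pre_cluster_chunks; infer_instance

def pvWitness_cluster_chunks : List (List Int) := [[0, 0, 0], [10, 0, 0], [100, 100, 100]]

-- On the empty input A returns [[]] (a list containing one empty group); B returns [] (no groups),
-- the intended value since there are no chunks to group.
def D_cluster_chunks (chunks_with_centers : List (List Int)) : Prop := chunks_with_centers = []
instance (chunks_with_centers : List (List Int)) : Decidable (D_cluster_chunks chunks_with_centers) := by
  unfold D_cluster_chunks; infer_instance

def Spec_cluster_chunks (chunks_with_centers : List (List Int)) (out : List (List Int)) : Prop :=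
  ¬ D_cluster_chunks chunks_with_centers → out = cluster_chunks_alt chunks_with_centers
instance (chunks_with_centers : List (List Int)) (out : List (List Int)) : Decidable (Spec_cluster_chunks chunks_with_centers out) := by
  unfold Spec_cluster_chunks; infer_instance

def pvDiffWitness_cluster_chunks : List (List Int) := []
def pvDiffWitnessOut_cluster_chunks : (List (List Int)) × (List (List Int)) := ([[]], [])

-- ===== CLAIM (what is proved, stated in full; the proofs are below) =====
def Claim_unchanged_cluster_chunks : Prop := ∀ (chunks_with_centers : List (List Int)), Dom_cluster_chunks chunks_with_centers → Pre_cluster_chunks chunks_with_centers → Spec_cluster_chunks chunks_with_centers (cluster_chunks chunks_with_centers)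
def Claim_changed_cluster_chunks : Prop := Dom_cluster_chunks (pvDiffWitness_cluster_chunks) ∧ Pre_cluster_chunks (pvDiffWitness_cluster_chunks) ∧ D_cluster_chunks (pvDiffWitness_cluster_chunks) ∧ cluster_chunks (pvDiffWitness_cluster_chunks) = pvDiffWitnessOut_cluster_chunks.1 ∧ cluster_chunks_alt (pvDiffWitness_cluster_chunks) = pvDiffWitnessOut_cluster_chunks.2 ∧ pvDiffWitnessOut_cluster_chunks.1 ≠ pvDiffWitnessOut_cluster_chunks.2
def Claim_exact_cluster_chunks : Prop := ∀ (chunks_with_centers : List (List Int)), Dom_cluster_chunks chunks_with_centers → Pre_cluster_chunks chunks_with_centers → D_cluster_chunks chunks_with_centers → cluster_chunks chunks_with_centers ≠ cluster_chunks_alt chunks_with_centers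

-- ===== LEMMAS AND PROOFS =====

-- ---- abstract functional-graph theory (parent array as a function ℕ → ℕ) ----

abbrev pvReaches (f : Nat → Nat) (x : Nat) : Prop := ∃ k, f (f^[k] x) = f^[k] x

noncomputable def pvD (f : Nat → Nat) (x : Nat) : Nat :=
  letI := Classical.propDecidable (pvReaches f x)
  if h : pvReaches f x then Nat.find h else 0

noncomputable def pvRoot (f : Nat → Nat) (x : Nat) : Nat := f^[pvD f x] x

lemma pvD_spec {f : Nat → Nat} {x : Nat} (h : pvReaches f x) :
    f (f^[pvD f x] x) = f^[pvD f x] x := by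
  unfold pvD; rw [dif_pos h]; exact Nat.find_spec h

lemma pvD_min {f : Nat → Nat} {x : Nat} (h : pvReaches f x) {k : Nat} (hk : k < pvD f x) :
    f (f^[k] x) ≠ f^[k] x := by
  unfold pvD at hk; rw [dif_pos h] at hk; exact Nat.find_min h hk

lemma pvD_le {f : Nat → Nat} {x : Nat} (h : pvReaches f x) {k : Nat}
    (hk : f (f^[k] x) = f^[k] x) : pvD f x ≤ k := by
  unfold pvD; rw [dif_pos h]; exact Nat.find_le hk

lemma pvRoot_fix {f : Nat → Nat} {x : Nat} (h : pvReaches f x) :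
    f (pvRoot f x) = pvRoot f x := pvD_spec h

lemma pvD_of_fix {f : Nat → Nat} {x : Nat} (hx : f x = x) : pvD f x = 0 := by
  have h : pvReaches f x := ⟨0, by simpa using hx⟩
  exact Nat.le_zero.mp (pvD_le h (by simpa using hx))

lemma pvRoot_of_fix {f : Nat → Nat} {x : Nat} (hx : f x = x) : pvRoot f x = x := by
  unfold pvRoot; rw [pvD_of_fix hx]; rfl

lemma pvReaches_step {f : Nat → Nat} {x : Nat} : pvReaches f (f x) ↔ pvReaches f x := by
  constructor
  · rintro ⟨k, hk⟩
    exact ⟨k + 1, by rwa [Function.iterate_succ_apply]⟩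
  · rintro ⟨k, hk⟩
    refine ⟨k, ?_⟩
    have : f^[k] (f x) = f^[k] x := by
      rw [← Function.iterate_succ_apply, Function.iterate_succ_apply', hk]
    rw [this, hk]

lemma pvD_step {f : Nat → Nat} {x : Nat} (h : pvReaches f x) (hx : f x ≠ x) :
    pvD f x = pvD f (f x) + 1 := by
  have h' : pvReaches f (f x) := pvReaches_step.mpr h
  apply le_antisymm
  · apply pvD_le h
    rw [Function.iterate_succ_apply]
    exact pvD_spec h'
  · have h0 : pvD f x ≠ 0 := by
      intro h0
      apply hx
      have := pvD_spec h
      rw [h0] at this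
      simpa using this
    obtain ⟨e, he⟩ := Nat.exists_eq_succ_of_ne_zero h0
    have hfix : f (f^[e] (f x)) = f^[e] (f x) := by
      have := pvD_spec h
      rw [he] at this
      simpa [Function.iterate_succ_apply] using this
    have := pvD_le h' hfix
    omega

lemma pvRoot_step {f : Nat → Nat} {x : Nat} (h : pvReaches f x) :
    pvRoot f (f x) = pvRoot f x := by
  by_cases hx : f x = x
  · rw [hx]
  · unfold pvRoot
    rw [pvD_step h hx, Function.iterate_succ_apply]

lemma pvD_le_step {f : Nat → Nat} {x : Nat} (h' : pvReaches f (f x)) :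
    pvD f x ≤ pvD f (f x) + 1 := by
  apply pvD_le (pvReaches_step.mp h')
  rw [Function.iterate_succ_apply]
  exact pvD_spec h'

lemma pvIter_lt {f : Nat → Nat} {n x : Nat} (hf : ∀ y < n, f y < n) (hx : x < n) :
    ∀ k, f^[k] x < n := by
  intro k
  induction k with
  | zero => simpa using hx
  | succ k ih => rw [Function.iterate_succ_apply']; exact hf _ ih

lemma pvD_lt {f : Nat → Nat} {n x : Nat} (hf : ∀ y < n, f y < n) (hx : x < n)
    (h : pvReaches f x) : pvD f x < n := by
  set d := pvD f x with hd
  have key : ∀ i j, i < j → j ≤ d → f^[i] x ≠ f^[j] x := by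
    intro i j hij hjd heq
    have h1 : f^[(d - j) + i] x = f^[d] x := by
      have : f^[(d - j) + j] x = f^[d] x := by rw [Nat.sub_add_cancel hjd]
      calc f^[(d - j) + i] x = f^[d - j] (f^[i] x) := Function.iterate_add_apply f _ i x
        _ = f^[d - j] (f^[j] x) := by rw [heq]
        _ = f^[(d - j) + j] x := (Function.iterate_add_apply f _ j x).symm
        _ = f^[d] x := this
    have hfix : f (f^[(d - j) + i] x) = f^[(d - j) + i] x := by
      rw [h1]; exact pvD_spec h
    exact pvD_min h (by omega) hfix
  have hinj : Function.Injective (fun i : Fin (d + 1) => (⟨f^[i] x, pvIter_lt hf hx i⟩ : Fin n)) := by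
    intro i j hij
    simp only [Fin.mk.injEq] at hij
    by_contra hne
    rcases Nat.lt_or_ge i.val j.val with hlt | hge
    · exact key i j hlt (by omega) hij
    · have : (j : Nat) < i := by
        rcases Nat.lt_or_ge j.val i.val with h' | h'
        · exact h'
        · exact absurd (Fin.ext (by omega)) hne
      exact key j i this (by omega) hij.symm
  have := Fintype.card_le_of_injective _ hinj
  simp at this
  omega

lemma pvRoot_lt {f : Nat → Nat} {n x : Nat} (hf : ∀ y < n, f y < n) (hx : x < n)
    (_h : pvReaches f x) : pvRoot f x < n := pvIter_lt hf hx _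

-- linking one root under another rewrites exactly that root in the root map
lemma pvUnionLemma {f : Nat → Nat} {ra rb : Nat} (hra : f ra = ra) (hrb : f rb = rb) :
    ∀ y, pvReaches f y →
      pvReaches (Function.update f ra rb) y ∧
      pvRoot (Function.update f ra rb) y = (if pvRoot f y = ra then rb else pvRoot f y) := by
  by_cases hab : ra = rb
  · subst hab
    have hg : Function.update f ra ra = f := by
      have hg := Function.update_eq_self ra f
      rwa [hra] at hg
    rw [hg]
    intro y hy
    refine ⟨hy, ?_⟩
    by_cases h : pvRoot f y = ra <;> simp [h]
  · set g := Function.update f ra rb with hgdef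
    have hgra : g ra = rb := Function.update_self ra rb f
    have hgrb : g rb = rb := by
      rw [hgdef, Function.update_of_ne (Ne.symm hab) rb f]; exact hrb
    have fixcase : ∀ y, f y = y →
        pvReaches g y ∧ pvRoot g y = (if pvRoot f y = ra then rb else pvRoot f y) := by
      intro y hfy
      by_cases hyra : y = ra
      · subst hyra
        have Rg : pvReaches g y := ⟨1, by simp [hgra, hgrb]⟩
        refine ⟨Rg, ?_⟩
        have h1 : pvRoot g (g y) = pvRoot g y := pvRoot_step Rg
        rw [← h1, hgra, pvRoot_of_fix hgrb, pvRoot_of_fix hfy]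
        simp
      · have hgy : g y = y := by
          rw [hgdef, Function.update_of_ne hyra rb f]; exact hfy
        refine ⟨⟨0, by simpa using hgy⟩, ?_⟩
        rw [pvRoot_of_fix hgy, pvRoot_of_fix hfy]
        simp [hyra]
    suffices H : ∀ d y, pvD f y ≤ d → pvReaches f y →
        pvReaches g y ∧ pvRoot g y = (if pvRoot f y = ra then rb else pvRoot f y) by
      intro y hy; exact H (pvD f y) y le_rfl hy
    intro d
    induction d with
    | zero =>
      intro y hd hy
      have hfy : f y = y := by
        by_contra hne
        have := pvD_step hy hne
        omega
      exact fixcase y hfy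
    | succ d ih =>
      intro y hd hy
      by_cases hfy : f y = y
      · exact fixcase y hfy
      · have hyra : y ≠ ra := fun e => hfy (by rw [e]; exact hra)
        have hstep : pvD f y = pvD f (f y) + 1 := pvD_step hy hfy
        have hfyR : pvReaches f (f y) := pvReaches_step.mpr hy
        obtain ⟨R1, E1⟩ := ih (f y) (by omega) hfyR
        have hgy : g y = f y := by rw [hgdef]; exact Function.update_of_ne hyra rb f
        have Rg : pvReaches g y := pvReaches_step.mp (by rwa [hgy])
        refine ⟨Rg, ?_⟩
        have h1 : pvRoot g (g y) = pvRoot g y := pvRoot_step Rg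
        rw [← h1, hgy, E1, pvRoot_step hy]

-- path halving preserves every root and does not increase the distance to the root
lemma pvHalveLemma {f : Nat → Nat} {x : Nat} (hx : f x ≠ x) :
    ∀ y, pvReaches f y →
      pvReaches (Function.update f x (f (f x))) y ∧
      pvRoot (Function.update f x (f (f x))) y = pvRoot f y ∧
      pvD (Function.update f x (f (f x))) y ≤ pvD f y := by
  set g := Function.update f x (f (f x)) with hgdef
  have hgx : g x = f (f x) := Function.update_self x (f (f x)) f
  have hgne : ∀ y, y ≠ x → g y = f y := fun y hy => by
    rw [hgdef]; exact Function.update_of_ne hy (f (f x)) f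
  have fixcase : ∀ y, f y = y → pvReaches g y ∧ pvRoot g y = pvRoot f y ∧ pvD g y ≤ pvD f y := by
    intro y hfy
    have hyx : y ≠ x := fun e => hx (by rw [← e]; exact hfy)
    have hgy : g y = y := by rw [hgne y hyx]; exact hfy
    exact ⟨⟨0, by simpa using hgy⟩, by rw [pvRoot_of_fix hgy, pvRoot_of_fix hfy],
      by rw [pvD_of_fix hgy]; exact Nat.zero_le _⟩
  suffices H : ∀ d y, pvD f y ≤ d → pvReaches f y →
      pvReaches g y ∧ pvRoot g y = pvRoot f y ∧ pvD g y ≤ pvD f y by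
    intro y hy; exact H (pvD f y) y le_rfl hy
  intro d
  induction d with
  | zero =>
    intro y hd hy
    have hfy : f y = y := by
      by_contra hne
      have := pvD_step hy hne
      omega
    exact fixcase y hfy
  | succ d ih =>
    intro y hd hy
    by_cases hfy : f y = y
    · exact fixcase y hfy
    · have hstep : pvD f y = pvD f (f y) + 1 := pvD_step hy hfy
      have hfyR : pvReaches f (f y) := pvReaches_step.mpr hy
      by_cases hyx : y = x
      · -- y = x : parent[x] is rewritten to the grandparent f (f x)
        subst hyx
        have hffxR : pvReaches f (f (f y)) := pvReaches_step.mpr hfyR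
        have hdz : pvD f (f (f y)) ≤ pvD f (f y) := by
          by_cases hffx : f (f y) = f y
          · rw [hffx]
          · have := pvD_step hfyR hffx
            omega
        obtain ⟨Rz, Ez, Dz⟩ := ih (f (f y)) (by omega) hffxR
        have Rg : pvReaches g y := pvReaches_step.mp (by rwa [hgx])
        refine ⟨Rg, ?_, ?_⟩
        · have h1 : pvRoot g (g y) = pvRoot g y := pvRoot_step Rg
          rw [← h1, hgx, Ez, pvRoot_step hfyR, pvRoot_step hy]
        · have h2 : pvD g y ≤ pvD g (g y) + 1 := pvD_le_step (by rwa [hgx])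
          rw [hgx] at h2
          omega
      · have hgy : g y = f y := hgne y hyx
        obtain ⟨R1, E1, D1⟩ := ih (f y) (by omega) hfyR
        have Rg : pvReaches g y := pvReaches_step.mp (by rwa [hgy])
        refine ⟨Rg, ?_, ?_⟩
        · have h1 : pvRoot g (g y) = pvRoot g y := pvRoot_step Rg
          rw [← h1, hgy, E1, pvRoot_step hy]
        · have h2 : pvD g y ≤ pvD g (g y) + 1 := pvD_le_step (by rwa [hgy])
          rw [hgy] at h2
          omega

-- ---- bridge between parent lists and functions ----

def pvF (p : List Nat) : Nat → Nat := fun y => p.getD y 0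

def pvGood (p : List Nat) (n : Nat) : Prop :=
  p.length = n ∧ (∀ x < n, pvF p x < n) ∧ (∀ x < n, pvReaches (pvF p) x)

lemma pvF_set {p : List Nat} {x : Nat} (hx : x < p.length) (v : Nat) :
    pvF (p.set x v) = Function.update (pvF p) x v := by
  funext y
  simp only [pvF, Function.update]
  by_cases hyx : y = x
  · subst hyx
    simp [List.getD_eq_getElem?_getD, hx]
  · simp [List.getD_eq_getElem?_getD, List.getElem?_set_ne (by omega : x ≠ y), hyx]

lemma pvGood_range (n : Nat) : pvGood (List.range n) n := by
  refine ⟨List.length_range, ?_, ?_⟩ <;> intro x hx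
  · simpa [pvF, List.getD_eq_getElem?_getD, List.getElem?_range hx] using hx
  · exact ⟨0, by simp [pvF, List.getD_eq_getElem?_getD, List.getElem?_range hx]⟩

-- ---- specification of the ported find / union ----

lemma pvFindA_spec {n : Nat} : ∀ (fuel : Nat) (p : List Nat) (x : Nat),
    pvGood p n → x < n → pvD (pvF p) x < fuel →
    (pvFindA fuel p x).2 = pvRoot (pvF p) x ∧
    pvGood (pvFindA fuel p x).1 n ∧
    (∀ y < n, pvRoot (pvF (pvFindA fuel p x).1) y = pvRoot (pvF p) y) := by
  intro fuel
  induction fuel with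
  | zero => intro p x _ _ h; omega
  | succ fuel ih =>
    intro p x hp hx hd
    obtain ⟨hlen, hrange, hreach⟩ := hp
    by_cases hpx : p.getD x 0 = x
    · have heq : pvFindA (fuel + 1) p x = (p, x) := by
        show (if p.getD x 0 ≠ x then pvFindA fuel (p.set x (p.getD (p.getD x 0) 0)) (p.getD (p.getD x 0) 0) else (p, x)) = (p, x)
        exact if_neg (not_not_intro hpx)
      rw [heq]
      exact ⟨(pvRoot_of_fix hpx).symm, ⟨hlen, hrange, hreach⟩, fun y _ => rfl⟩
    · have heq : pvFindA (fuel + 1) p x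
          = pvFindA fuel (p.set x (pvF p (pvF p x))) (pvF p (pvF p x)) := by
        show (if p.getD x 0 ≠ x then pvFindA fuel (p.set x (p.getD (p.getD x 0) 0)) (p.getD (p.getD x 0) 0) else (p, x)) = _
        exact if_pos hpx
      have hfx : pvF p x ≠ x := hpx
      have hx1 : pvF p x < n := hrange x hx
      have hx2 : pvF p (pvF p x) < n := hrange _ hx1
      have hRx : pvReaches (pvF p) x := hreach x hx
      have hRfx : pvReaches (pvF p) (pvF p x) := pvReaches_step.mpr hRx
      have hRffx : pvReaches (pvF p) (pvF p (pvF p x)) := pvReaches_step.mpr hRfx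
      have hxlen : x < p.length := by omega
      have hF' : pvF (p.set x (pvF p (pvF p x)))
          = Function.update (pvF p) x (pvF p (pvF p x)) := pvF_set hxlen _
      have halve := pvHalveLemma hfx
      have good' : pvGood (p.set x (pvF p (pvF p x))) n := by
        refine ⟨by simpa using hlen, ?_, ?_⟩ <;> intro z hz <;> rw [hF']
        · by_cases hzx : z = x
          · subst hzx; rw [Function.update_self]; exact hx2
          · rw [Function.update_of_ne hzx]; exact hrange z hz
        · exact (halve z (hreach z hz)).1
      have hd' : pvD (pvF (p.set x (pvF p (pvF p x)))) (pvF p (pvF p x)) < fuel := by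
        have d1 : pvD (pvF p) x = pvD (pvF p) (pvF p x) + 1 := pvD_step hRx hfx
        have d2 : pvD (pvF p) (pvF p (pvF p x)) ≤ pvD (pvF p) (pvF p x) := by
          by_cases h2 : pvF p (pvF p x) = pvF p x
          · rw [h2]
          · have := pvD_step hRfx h2; omega
        have d3 : pvD (pvF (p.set x (pvF p (pvF p x)))) (pvF p (pvF p x))
            ≤ pvD (pvF p) (pvF p (pvF p x)) := by
          rw [hF']; exact (halve _ hRffx).2.2
        omega
      obtain ⟨e1, g1, r1⟩ := ih (p.set x (pvF p (pvF p x))) (pvF p (pvF p x)) good' hx2 hd'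
      rw [heq]
      refine ⟨?_, g1, ?_⟩
      · rw [e1, hF', (halve _ hRffx).2.1, pvRoot_step hRfx, pvRoot_step hRx]
      · intro y hy
        rw [r1 y hy, hF', (halve y (hreach y hy)).2.1]

lemma pvUnionA_spec {n : Nat} (p : List Nat) (a b : Nat)
    (hp : pvGood p n) (ha : a < n) (hb : b < n) :
    pvGood (pvUnionA p a b) n ∧
    (∀ y < n, pvRoot (pvF (pvUnionA p a b)) y =
      (if pvRoot (pvF p) y = pvRoot (pvF p) a then pvRoot (pvF p) b else pvRoot (pvF p) y)) := by
  have hdb : pvD (pvF p) b < p.length := by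
    rw [hp.1]; exact pvD_lt hp.2.1 hb (hp.2.2 b hb)
  obtain ⟨eb, gb, rb_pres⟩ := pvFindA_spec (n := n) p.length p b hp hb hdb
  set fb := pvFindA p.length p b with hfb
  have hda : pvD (pvF fb.1) a < fb.1.length := by
    rw [gb.1]; exact pvD_lt gb.2.1 ha (gb.2.2 a ha)
  obtain ⟨ea, ga, ra_pres⟩ := pvFindA_spec (n := n) fb.1.length fb.1 a gb ha hda
  set fa := pvFindA fb.1.length fb.1 a with hfa
  have hq : pvUnionA p a b = fa.1.set fa.2 fb.2 := rfl
  -- roots of a and b in the current parent list fa.1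
  have hroota : pvRoot (pvF fa.1) a = fa.2 := by rw [ra_pres a ha, ← ea]
  have hrootb : pvRoot (pvF fa.1) b = fb.2 := by rw [ra_pres b hb, rb_pres b hb, ← eb]
  have hra : pvF fa.1 fa.2 = fa.2 := by
    rw [← hroota]; exact pvRoot_fix (ga.2.2 a ha)
  have hrb : pvF fa.1 fb.2 = fb.2 := by
    rw [← hrootb]; exact pvRoot_fix (ga.2.2 b hb)
  have hran : fa.2 < n := by rw [← hroota]; exact pvRoot_lt ga.2.1 ha (ga.2.2 a ha)
  have hrbn : fb.2 < n := by rw [← hrootb]; exact pvRoot_lt ga.2.1 hb (ga.2.2 b hb)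
  have hF : pvF (fa.1.set fa.2 fb.2) = Function.update (pvF fa.1) fa.2 fb.2 :=
    pvF_set (by rw [ga.1]; exact hran) _
  have hun := pvUnionLemma hra hrb
  have hrw : ∀ y < n, pvRoot (pvF fa.1) y = pvRoot (pvF p) y := by
    intro y hy; rw [ra_pres y hy, rb_pres y hy]
  rw [hq]
  constructor
  · refine ⟨by simpa using ga.1, ?_, ?_⟩ <;> intro z hz <;> rw [hF]
    · by_cases hz2 : z = fa.2
      · subst hz2; rw [Function.update_self]; exact hrbn
      · rw [Function.update_of_ne hz2]; exact ga.2.1 z hz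
    · exact (hun z (ga.2.2 z hz)).1
  · intro y hy
    rw [hF, (hun y (ga.2.2 y hy)).2, hrw y hy, ← hroota, hrw a ha, ← hrootb, hrw b hb]

-- ---- relating the two edge loops ----

lemma pvFoldlRel {α β γ : Type} (R : α → β → Prop) (l : List γ)
    (f : α → γ → α) (g : β → γ → β) (a : α) (b : β)
    (hab : R a b) (hstep : ∀ x ∈ l, ∀ a b, R a b → R (f a x) (g b x)) :
    R (l.foldl f a) (l.foldl g b) := by
  induction l generalizing a b with
  | nil => exact hab
  | cons x xs ih =>
    exact ih _ _ (hstep x (List.mem_cons_self) a b hab)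
      (fun y hy => hstep y (List.mem_cons_of_mem x hy))

def pvRel (n : Nat) (p c : List Nat) : Prop :=
  pvGood p n ∧ c.length = n ∧ ∀ k < n, c.getD k 0 = pvRoot (pvF p) k

lemma pvEdge_step {chunks : List (List Int)} {i j : Nat} {p c : List Nat}
    (hi : i < chunks.length) (hj : j < chunks.length)
    (h : pvRel chunks.length p c) :
    pvRel chunks.length (pvInnerA chunks i p j) (pvInnerB chunks i c j) := by
  obtain ⟨hgood, hclen, hcval⟩ := h
  set dx := PySem.List.pyGetD (chunks.getD i []) 0 0 - PySem.List.pyGetD (chunks.getD j []) 0 0 with hdx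
  set dy := PySem.List.pyGetD (chunks.getD i []) 1 0 - PySem.List.pyGetD (chunks.getD j []) 1 0 with hdy
  set dz := PySem.List.pyGetD (chunks.getD i []) 2 0 - PySem.List.pyGetD (chunks.getD j []) 2 0 with hdz
  have hA : pvInnerA chunks i p j
      = if dx * dx + dy * dy + dz * dz < 625 then pvUnionA p i j else p := rfl
  have hB : pvInnerB chunks i c j
      = if dx * dx + dy * dy + dz * dz < 625 then
          (if c.getD i 0 ≠ c.getD j 0 then
            c.map (fun v => if v = c.getD i 0 then c.getD j 0 else v) else c)
        else c := rfl
  rw [hA, hB]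
  by_cases hclose : dx * dx + dy * dy + dz * dz < 625
  · rw [if_pos hclose, if_pos hclose]
    obtain ⟨qgood, qroot⟩ := pvUnionA_spec (n := chunks.length) p i j hgood hi hj
    have hci : c.getD i 0 = pvRoot (pvF p) i := hcval i hi
    have hcj : c.getD j 0 = pvRoot (pvF p) j := hcval j hj
    by_cases hab : c.getD i 0 = c.getD j 0
    · rw [if_neg (not_not_intro hab)]
      refine ⟨qgood, hclen, ?_⟩
      intro k hk
      rw [hcval k hk, qroot k hk]
      rw [hci, hcj] at hab
      by_cases hk2 : pvRoot (pvF p) k = pvRoot (pvF p) i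
      · rw [if_pos hk2, ← hab, hk2]
      · rw [if_neg hk2]
    · rw [if_pos hab]
      refine ⟨qgood, by simpa using hclen, ?_⟩
      intro k hk
      have hk' : k < c.length := by omega
      have hmap : (c.map (fun v => if v = c.getD i 0 then c.getD j 0 else v)).getD k 0
          = if c.getD k 0 = c.getD i 0 then c.getD j 0 else c.getD k 0 := by
        rw [List.getD_eq_getElem _ _ (by simpa using hk'), List.getElem_map,
            List.getD_eq_getElem _ _ hk']
      rw [hmap, qroot k hk, hcval k hk, hci, hcj]
  · rw [if_neg hclose, if_neg hclose]
    exact ⟨hgood, hclen, hcval⟩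

lemma pvEdges_rel (chunks : List (List Int)) :
    pvRel chunks.length
      ((List.range chunks.length).foldl (pvOuterA chunks) (List.range chunks.length))
      ((List.range chunks.length).foldl (pvOuterB chunks) (List.range chunks.length)) := by
  apply pvFoldlRel (R := pvRel chunks.length)
  · refine ⟨pvGood_range _, by simp, ?_⟩
    intro k hk
    have hgd : (List.range chunks.length).getD k 0 = k := by
      rw [List.getD_eq_getElem _ _ (by simpa using hk)]
      exact List.getElem_range _
    rw [hgd]
    exact (pvRoot_of_fix (show pvF (List.range chunks.length) k = k from hgd)).symm
  · intro x hx p c hpc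
    apply pvFoldlRel (R := pvRel chunks.length) _ _ _ _ _ hpc
    intro j hj pp cc hrel
    have hjlt : j < chunks.length := by
      have hmem : j ∈ List.range chunks.length := List.mem_of_mem_drop hj
      simpa using hmem
    exact pvEdge_step (List.mem_range.mp hx) hjlt hrel

-- ---- the grouping phase ----

lemma pvGroupA_eq {n : Nat} (K : Nat → Nat) : ∀ (l : List Nat) (p : List Nat) (d : PySem.Dict Nat (List Int)),
    pvGood p n → (∀ y < n, pvRoot (pvF p) y = K y) → (∀ i ∈ l, i < n) →
    (l.foldl pvGroupA (p, d)).2 =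
      l.foldl (fun d i => d.modify (K i) [] (fun g => g ++ [(i : Int)])) d := by
  intro l
  induction l with
  | nil => intro p d _ _ _; rfl
  | cons i l ih =>
    intro p d hgood hK hl
    have hi : i < n := hl i List.mem_cons_self
    have hd : pvD (pvF p) i < p.length := by
      rw [hgood.1]; exact pvD_lt hgood.2.1 hi (hgood.2.2 i hi)
    obtain ⟨e1, g1, r1⟩ := pvFindA_spec (n := n) p.length p i hgood hi hd
    set fr := pvFindA p.length p i with hfr
    have hstep : pvGroupA (p, d) i = (fr.1, d.modify (K i) [] (fun g => g ++ [(i : Int)])) := by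
      show (fr.1, d.modify fr.2 [] (fun g => g ++ [(i : Int)]))
          = (fr.1, d.modify (K i) [] (fun g => g ++ [(i : Int)]))
      rw [e1, hK i hi]
    rw [List.foldl_cons, List.foldl_cons, hstep]
    exact ih fr.1 _ g1 (fun y hy => by rw [r1 y hy]; exact hK y hy)
      (fun j hj => hl j (List.mem_cons_of_mem _ hj))

lemma pvB_char (chunks : List (List Int)) (K : Nat → Nat)
    (hc : ∀ k < chunks.length,
        ((List.range chunks.length).foldl (pvOuterB chunks) (List.range chunks.length)).getD k 0 = K k)
    (hlen : ((List.range chunks.length).foldl (pvOuterB chunks) (List.range chunks.length)).length = chunks.length) :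
    cluster_chunks_alt chunks =
      (PySem.Set.ofList ((List.range chunks.length).map K)).map
        (fun r => (((List.range chunks.length).filter (fun i => K i == r))).map (fun i => (i : Int))) := by
  set cid := (List.range chunks.length).foldl (pvOuterB chunks) (List.range chunks.length) with hciddef
  have hout : cluster_chunks_alt chunks
      = (cid.foldl (fun rs r => if rs.contains r then rs else rs ++ [r]) []).map
          (fun r => ((List.range chunks.length).filter (fun i => cid.getD i 0 == r)).map (fun i => (i : Int))) := rfl
  have hcid : cid = (List.range chunks.length).map K := by
    apply List.ext_getElem (by simpa using hlen)
    intro k h1 h2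
    have hk : k < chunks.length := by simpa using h2
    have hgd := hc k hk
    rw [List.getD_eq_getElem _ _ h1] at hgd
    rw [hgd, List.getElem_map, List.getElem_range]
  have hreps : cid.foldl (fun rs r => if rs.contains r then rs else rs ++ [r]) []
      = PySem.Set.ofList cid := rfl
  have hfil : ∀ r : Nat,
      List.filter (fun i => (List.map K (List.range chunks.length)).getD i 0 == r) (List.range chunks.length)
        = List.filter (fun i => K i == r) (List.range chunks.length) := fun r =>
    List.filter_congr (fun k hk => by rw [← hcid, hc k (List.mem_range.mp hk)])
  rw [hout, hreps, hcid]
  simp only [hfil]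

lemma pvA_char (chunks : List (List Int)) (K : Nat → Nat)
    (h2 : 2 ≤ chunks.length)
    (hp : pvGood ((List.range chunks.length).foldl (pvOuterA chunks) (List.range chunks.length)) chunks.length)
    (hK : ∀ y < chunks.length,
        pvRoot (pvF ((List.range chunks.length).foldl (pvOuterA chunks) (List.range chunks.length))) y = K y) :
    cluster_chunks chunks =
      (PySem.Set.ofList ((List.range chunks.length).map K)).map
        (fun r => (((List.range chunks.length).filter (fun i => K i == r))).map (fun i => (i : Int))) := by
  set pA := (List.range chunks.length).foldl (pvOuterA chunks) (List.range chunks.length) with hpA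
  have hout : cluster_chunks chunks
      = (((List.range chunks.length).foldl pvGroupA (pA, PySem.Dict.empty)).2).values := by
    show (if chunks.length ≤ 1 then [(List.range chunks.length).map (fun i => (i : Int))]
          else (((List.range chunks.length).foldl pvGroupA (pA, PySem.Dict.empty)).2).values) = _
    rw [if_neg (by omega)]
  rw [hout, pvGroupA_eq (n := chunks.length) K (List.range chunks.length) pA PySem.Dict.empty hp hK
    (fun i hi => List.mem_range.mp hi)]
  set D := (List.range chunks.length).foldl
      (fun d i => d.modify (K i) [] (fun g => g ++ [(i : Int)])) PySem.Dict.empty with hD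
  have hnodup : D.keys.Nodup := by
    rw [hD]
    exact PySem.Dict.nodup_keys_foldl_modify_key _ _ _ _ _ (by simp)
  have hkeys : D.keys = PySem.Set.ofList ((List.range chunks.length).map K) := by
    rw [hD, PySem.Dict.keys_foldl_modify_key]
    rfl
  have hgetD : ∀ r, D.getD r []
      = ((List.range chunks.length).filter (fun i => K i == r)).map (fun i => (i : Int)) := by
    intro r
    have hpair : D = (((List.range chunks.length).map (fun i => (K i, (i : Int)))).foldl
        (fun d q => d.modify q.1 [] (fun g => g ++ [q.2])) PySem.Dict.empty) := by
      rw [hD, List.foldl_map]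
    rw [hpair, PySem.Dict.getD_foldl_modify_append, List.filter_map, List.map_map]
    simp [Function.comp_def, ← List.map_eq_flatMap]
  rw [PySem.Dict.values_eq_map_keys D hnodup [], hkeys]
  apply List.map_congr_left
  intro r _
  exact hgetD r

lemma pvB_single {chunks : List (List Int)} (h : chunks.length = 1) :
    cluster_chunks_alt chunks = [[(0 : Int)]] := by
  have hout : cluster_chunks_alt chunks
      = (let cid := (List.range chunks.length).foldl (pvOuterB chunks) (List.range chunks.length)
         (cid.foldl (fun rs r => if rs.contains r then rs else rs ++ [r]) []).map
          (fun r => ((List.range chunks.length).filter (fun i => cid.getD i 0 == r)).map (fun i => (i : Int)))) := rfl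
  rw [hout, h]
  simp [pvOuterB, h, List.range_succ]

-- ===== VERDICT (by name: the statement is the Claim_ definition above) =====
theorem cluster_chunks_spec : Claim_unchanged_cluster_chunks := by
  intro chunks hdom hpre hD
  have hne : chunks ≠ [] := fun h => hD (by simpa [D_cluster_chunks] using h)
  show cluster_chunks chunks = cluster_chunks_alt chunks
  by_cases h0 : chunks.length = 0
  · exact absurd (List.length_eq_zero_iff.mp h0) hne
  by_cases h1 : chunks.length = 1
  · have hA : cluster_chunks chunks = [[(0 : Int)]] := by
      show (if chunks.length ≤ 1 then [(List.range chunks.length).map (fun i => (i : Int))]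
            else _) = _
      rw [if_pos (by omega), h1]
      rfl
    rw [hA, pvB_single h1]
  · have h2 : 2 ≤ chunks.length := by omega
    obtain ⟨hgood, hclen, hcval⟩ := pvEdges_rel chunks
    rw [pvA_char chunks
        (pvRoot (pvF ((List.range chunks.length).foldl (pvOuterA chunks) (List.range chunks.length))))
        h2 hgood (fun y _ => rfl),
      pvB_char chunks
        (pvRoot (pvF ((List.range chunks.length).foldl (pvOuterA chunks) (List.range chunks.length))))
        hcval hclen]

theorem cluster_chunks_changed : Claim_changed_cluster_chunks := by
  unfold Claim_changed_cluster_chunks; decide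

theorem cluster_chunks_tight : Claim_exact_cluster_chunks := by
  intro chunks _ _ hD
  subst hD
  decide
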